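-- pv_equiv track=rewrite | github.com/DavidBaldasso/IA-2 | TP1/TP1_Aestrella_2agentes.py | wait_colision_calc
-- ===== SOURCE A (Python) =====
-- def cruce_colision(paths,time):
--     current_positions = [tuple(path[min(time,len(path)-1)]) for path in paths]
--     next_moves = [tuple(path[min(time + 1, len(path) - 1)]) for path in paths]
--     colision = len(set(next_moves)) < len(next_moves)
--     cruce = len({frozenset(sublista) for sublista in zip(current_positions, next_moves)}) < len(paths)
--     return cruce or colision
--
-- def wait_colision_calc(path_stay, path_move, time, max_wait):
--     path_stay = path_stay[min(time,len(path_stay)-1):]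
--     camino_espera = path_move[min(time,len(path_move)-1):]
--     for wait_time in range(max_wait+1):
--         colision = any( cruce_colision([camino_espera, path_stay], wait_t) for wait_t in range(wait_time+1) )
--         if not colision: return wait_time
--         camino_espera.insert(0,camino_espera[0])
--     return -1
-- ===== SOURCE B (Python) =====
-- def wait_colision_calc(path_stay, path_move, time, max_wait):
--     # O(max_wait): after w waiting steps the moving agent sits still for the
--     # first w steps and makes its first real move at step w, so a collision at
--     # wait w is "some stationary step t<w collides" (a running flag) OR the
--     # single start-move step w collides.
--     if max_wait < 0:
--         return -1
--     S = path_stay[min(time, len(path_stay) - 1):]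
--     E = path_move[min(time, len(path_move) - 1):]
--     e0 = E[0]
--     e1 = E[min(1, len(E) - 1)]
--     stat = False  # collision during some already-checked stationary step
--     for w in range(max_wait + 1):
--         s_cur = S[min(w, len(S) - 1)]
--         s_nxt = S[min(w + 1, len(S) - 1)]
--         move = (e1 == s_nxt) or (e0 == s_cur and e1 == s_nxt) or (e0 == s_nxt and e1 == s_cur)
--         if not (stat or move):
--             return w
--         stat = stat or (s_nxt == e0)
--     return -1
-- ===== Notes on version B (the rewrite author's own statement) =====
-- stated objective: faster
-- what changed: A re-scans all wait_time+1 past steps with cruce_colision on a freshly grown prepended path at every candidate wait; B observes that during the wait the moving agent sits at its start cell, so it keeps one running boolean for stationary-step collisions and checks only the single start-move step per candidate, in one O(max_wait) pass.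
import Mathlib
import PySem

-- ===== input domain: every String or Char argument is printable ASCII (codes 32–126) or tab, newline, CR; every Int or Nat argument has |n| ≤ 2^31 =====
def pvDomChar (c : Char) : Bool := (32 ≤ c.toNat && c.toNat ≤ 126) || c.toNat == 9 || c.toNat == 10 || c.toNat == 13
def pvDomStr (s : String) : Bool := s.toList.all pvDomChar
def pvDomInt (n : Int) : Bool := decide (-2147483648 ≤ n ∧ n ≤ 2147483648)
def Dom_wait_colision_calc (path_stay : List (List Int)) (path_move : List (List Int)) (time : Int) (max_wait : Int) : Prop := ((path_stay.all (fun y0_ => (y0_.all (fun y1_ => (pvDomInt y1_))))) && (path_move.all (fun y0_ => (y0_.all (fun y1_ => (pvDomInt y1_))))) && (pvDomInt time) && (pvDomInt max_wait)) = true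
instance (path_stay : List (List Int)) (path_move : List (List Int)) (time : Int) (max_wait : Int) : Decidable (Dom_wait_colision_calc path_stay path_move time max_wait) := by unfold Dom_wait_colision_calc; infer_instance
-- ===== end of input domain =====

-- B replaces A's O(max_wait^2) re-scan of all waited steps by an O(max_wait) loop with a
-- running collision flag for the stationary steps plus one check of the start-move step.

-- ===== PORT A =====
-- p[min(i, len(p)-1)] (in range whenever p ≠ [] and i ≥ 0, the only uses inside Pre_)
def pyMinIdx (p : List (List Int)) (i : Int) : List Int :=
  PySem.List.pyGetD p (min i ((p.length : Int) - 1)) []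

def cruce_colision (paths : List (List (List Int))) (time : Int) : Bool :=
  let current_positions := paths.map (fun path => pyMinIdx path time)
  let next_moves := paths.map (fun path => pyMinIdx path (time + 1))
  let colision := decide ((PySem.Set.ofList next_moves).length < next_moves.length)
  -- {frozenset(sublista) for ...}: a set of frozensets — deduplicate under SET equality
  -- (PySem.Set.equal), hand-ported because Lean's `=` on PySem.Set is order-sensitive
  let fsets := (current_positions.zip next_moves).map (fun cn => PySem.Set.ofList [cn.1, cn.2])
  let cruce := decide ((fsets.foldl
      (fun acc s => if acc.any (fun u => PySem.Set.equal u s) then acc else acc ++ [s])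
      ([] : List (PySem.Set (List Int)))).length < paths.length)
  cruce || colision

-- the for-loop; k iterations remain, w is wait_time; camino_espera[0] = cam.headD []
-- (in Python an IndexError on empty cam, which Pre_ excludes)
def wcc_loop (S : List (List Int)) : List (List Int) → Nat → Nat → Int
  | _, 0, _ => -1
  | cam, k + 1, w =>
    if (PySem.List.pyRange 0 ((w : Int) + 1) 1).any (fun t => cruce_colision [cam, S] t) then
      wcc_loop S (cam.headD [] :: cam) k (w + 1)
    else (w : Int)

def wait_colision_calc (path_stay : List (List Int)) (path_move : List (List Int)) (time : Int) (max_wait : Int) : Int :=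
  wcc_loop (PySem.List.slice path_stay (some (min time ((path_stay.length : Int) - 1))) none)
    (PySem.List.slice path_move (some (min time ((path_move.length : Int) - 1))) none)
    (max_wait + 1).toNat 0

-- ===== PORT B =====
def wcc_bloop (S : List (List Int)) (e0 e1 : List Int) : Nat → Nat → Bool → Int
  | 0, _, _ => -1
  | k + 1, w, stat =>
    let sCur := pyMinIdx S (w : Int)
    let sNxt := pyMinIdx S ((w : Int) + 1)
    let move := decide (e1 = sNxt) || (decide (e0 = sCur ∧ e1 = sNxt) || decide (e0 = sNxt ∧ e1 = sCur))
    if !(stat || move) then (w : Int)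
    else wcc_bloop S e0 e1 k (w + 1) (stat || decide (e0 = sNxt))

def wait_colision_calc_alt (path_stay : List (List Int)) (path_move : List (List Int)) (time : Int) (max_wait : Int) : Int :=
  if max_wait < 0 then -1
  else
    wcc_bloop (PySem.List.slice path_stay (some (min time ((path_stay.length : Int) - 1))) none)
      (PySem.List.pyGetD (PySem.List.slice path_move (some (min time ((path_move.length : Int) - 1))) none) 0 [])
      (pyMinIdx (PySem.List.slice path_move (some (min time ((path_move.length : Int) - 1))) none) 1)
      (max_wait + 1).toNat 0 false

-- ===== PRECONDITION & SPEC =====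
-- With max_wait ≥ 0 and an empty path, A raises IndexError (path[-1] on []); such inputs are excluded.
def Pre_wait_colision_calc (path_stay : List (List Int)) (path_move : List (List Int)) (time : Int) (max_wait : Int) : Prop :=
  max_wait < 0 ∨ (path_stay ≠ [] ∧ path_move ≠ [])
instance (path_stay : List (List Int)) (path_move : List (List Int)) (time : Int) (max_wait : Int) : Decidable (Pre_wait_colision_calc path_stay path_move time max_wait) := by unfold Pre_wait_colision_calc; infer_instance

def pvWitness_wait_colision_calc : List (List Int) × List (List Int) × Int × Int :=
  ([[0, 0], [0, 1]], [[1, 1], [0, 1], [0, 0]], 0, 3)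

def Spec_wait_colision_calc (path_stay : List (List Int)) (path_move : List (List Int)) (time : Int) (max_wait : Int) (out : Int) : Prop := out = wait_colision_calc_alt path_stay path_move time max_wait
instance (path_stay : List (List Int)) (path_move : List (List Int)) (time : Int) (max_wait : Int) (out : Int) : Decidable (Spec_wait_colision_calc path_stay path_move time max_wait out) := by unfold Spec_wait_colision_calc; infer_instance

-- ===== CLAIM (what is proved, stated in full; the proofs are below) =====
def Claim_equal_wait_colision_calc : Prop := ∀ (path_stay : List (List Int)) (path_move : List (List Int)) (time : Int) (max_wait : Int), Dom_wait_colision_calc path_stay path_move time max_wait → Pre_wait_colision_calc path_stay path_move time max_wait → Spec_wait_colision_calc path_stay path_move time max_wait (wait_colision_calc path_stay path_move time max_wait)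

-- ===== LEMMAS AND PROOFS =====

-- the slice path[min(time, len-1):] of a nonempty list is nonempty
lemma slice_min_ne_nil (xs : List (List Int)) (t : Int) (h : xs ≠ []) :
    PySem.List.slice xs (some (min t ((xs.length : Int) - 1))) none ≠ [] := by
  have hlen : 0 < xs.length := List.length_pos_iff.mpr h
  rcases lt_or_ge (min t ((xs.length : Int) - 1)) 0 with h0 | h0
  case inr =>
    rw [PySem.List.slice_from _ h0]
    simp only [ne_eq, List.drop_eq_nil_iff, not_le]
    omega
  case inl =>
    have hk : min t ((xs.length : Int) - 1) = -(((-(min t ((xs.length : Int) - 1))).toNat : Nat) : Int) := by omega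
    rw [hk, PySem.List.slice_from_neg_natCast _ _ (by omega)]
    simp only [ne_eq, List.drop_eq_nil_iff, not_le]
    omega

lemma getElem?_rep_app (E : List (List Int)) (hE : E ≠ []) (w t : Nat) (ht : t ≤ w) :
    (List.replicate w (E.headD []) ++ E)[t]? = some (E.headD []) := by
  rcases lt_or_eq_of_le ht with h | h
  · rw [List.getElem?_append_left (by simpa using h)]
    simp [h]
  · subst h
    rw [List.getElem?_append_right (by simp)]
    cases E with
    | nil => exact absurd rfl hE
    | cons a as => simp

lemma pyMinIdx_rep_app (E : List (List Int)) (hE : E ≠ []) (w t : Nat) (ht : t ≤ w) :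
    pyMinIdx (List.replicate w (E.headD []) ++ E) (t : Int) = E.headD [] := by
  have hlen : 0 < E.length := List.length_pos_iff.mpr hE
  have hmin : min (t : Int) (((List.replicate w (E.headD []) ++ E).length : Int) - 1) = (t : Int) := by
    simp only [List.length_append, List.length_replicate]
    omega
  unfold pyMinIdx
  rw [hmin, PySem.List.pyGetD_natCast]
  rw [List.getD_eq_getElem?_getD, getElem?_rep_app E hE w t ht]
  rfl

lemma pyMinIdx_rep_app_succ (E : List (List Int)) (hE : E ≠ []) (w : Nat) :
    pyMinIdx (List.replicate w (E.headD []) ++ E) ((w : Int) + 1) = pyMinIdx E 1 := by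
  have hlen : 0 < E.length := List.length_pos_iff.mpr hE
  unfold pyMinIdx
  rcases Nat.lt_or_ge E.length 2 with h2 | h2
  · -- E = [e]; both sides index position 0 of E
    have hE1 : E.length = 1 := by omega
    have hmin : min ((w : Int) + 1) (((List.replicate w (E.headD []) ++ E).length : Int) - 1) = (w : Int) := by
      simp only [List.length_append, List.length_replicate]
      omega
    have hmin2 : min (1 : Int) ((E.length : Int) - 1) = ((0 : Nat) : Int) := by omega
    rw [hmin, hmin2, PySem.List.pyGetD_natCast, PySem.List.pyGetD_natCast]
    rw [List.getD_eq_getElem?_getD, getElem?_rep_app E hE w w le_rfl]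
    cases E with
    | nil => exact absurd rfl hE
    | cons a as => simp
  · -- |E| ≥ 2: both sides are E[1]
    have hmin : min ((w : Int) + 1) (((List.replicate w (E.headD []) ++ E).length : Int) - 1) = (((w + 1 : Nat) : Nat) : Int) := by
      simp only [List.length_append, List.length_replicate]
      push_cast
      omega
    have hmin2 : min (1 : Int) ((E.length : Int) - 1) = ((1 : Nat) : Int) := by omega
    rw [hmin, hmin2, PySem.List.pyGetD_natCast, PySem.List.pyGetD_natCast]
    rw [List.getD_eq_getElem?_getD, List.getD_eq_getElem?_getD]
    rw [List.getElem?_append_right (by simp)]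
    simp

-- two-element python set: |{x,y}| < 2 ↔ x = y
lemma setlen_pair (x y : List Int) :
    ((PySem.Set.ofList [x, y]).length < 2) ↔ x = y := by
  by_cases h : y = x
  · subst h
    simp [PySem.Set.ofList, PySem.Set.add]
  · simp [PySem.Set.ofList, PySem.Set.add, h]
    intro hxy
    exact absurd hxy.symm h

-- frozenset pair equality
lemma equal_pair_iff (a b c d : List Int) :
    PySem.Set.equal (PySem.Set.ofList [a, b]) (PySem.Set.ofList [c, d]) = true ↔
      ((a = c ∧ b = d) ∨ (a = d ∧ b = c)) := by
  rw [PySem.Set.equal_iff]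
  constructor
  · intro h
    have ha := (h a).mp (by simp [PySem.Set.mem_ofList])
    have hb := (h b).mp (by simp [PySem.Set.mem_ofList])
    have hc := (h c).mpr (by simp [PySem.Set.mem_ofList])
    have hd := (h d).mpr (by simp [PySem.Set.mem_ofList])
    simp only [PySem.Set.mem_ofList, List.mem_cons, List.not_mem_nil, or_false] at ha hb hc hd
    rcases ha with rfl | rfl <;> rcases hb with hb | hb <;> tauto
  · rintro (⟨rfl, rfl⟩ | ⟨rfl, rfl⟩) <;> intro x <;>
      simp only [PySem.Set.mem_ofList, List.mem_cons, List.not_mem_nil, or_false] <;> tauto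

-- evaluation of cruce_colision on a two-path list
lemma cc_eval (cam S : List (List Int)) (t : Int) :
    cruce_colision [cam, S] t =
      (decide ((pyMinIdx cam t = pyMinIdx S t ∧ pyMinIdx cam (t + 1) = pyMinIdx S (t + 1)) ∨
               (pyMinIdx cam t = pyMinIdx S (t + 1) ∧ pyMinIdx cam (t + 1) = pyMinIdx S t)) ||
       decide (pyMinIdx cam (t + 1) = pyMinIdx S (t + 1))) := by
  unfold cruce_colision
  simp only [List.map_cons, List.map_nil, List.zip_cons_cons, List.zip_nil_right,
    List.foldl_cons, List.foldl_nil, List.any_nil, List.any_cons, Bool.or_false,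
    Bool.false_eq_true, if_false, List.nil_append, List.length_cons, List.length_nil]
  cases hb : PySem.Set.equal (PySem.Set.ofList [pyMinIdx cam t, pyMinIdx cam (t + 1)])
      (PySem.Set.ofList [pyMinIdx S t, pyMinIdx S (t + 1)]) with
  | true =>
    have hp := (equal_pair_iff _ _ _ _).mp hb
    simp [hp]
  | false =>
    have hp : ¬ ((pyMinIdx cam t = pyMinIdx S t ∧ pyMinIdx cam (t + 1) = pyMinIdx S (t + 1)) ∨
        (pyMinIdx cam t = pyMinIdx S (t + 1) ∧ pyMinIdx cam (t + 1) = pyMinIdx S t)) := by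
      intro h
      exact absurd ((equal_pair_iff _ _ _ _).mpr h) (by simp [hb])
    simp only [hb, Bool.false_eq_true, if_false, hp,
      decide_false, Bool.false_or]
    exact decide_eq_decide.mpr (by simpa using setlen_pair (pyMinIdx cam (t + 1)) (pyMinIdx S (t + 1)))

-- while the moving agent still waits, a step collides iff the stay agent's next cell is e0
lemma decide_absorb (x u v : List Int) :
    (decide ((x = u ∧ x = v) ∨ (x = v ∧ x = u)) || decide (x = v)) = decide (x = v) := by
  by_cases h : x = v <;> by_cases h2 : x = u <;> simp [h, h2]

lemma head_rep_app (E : List (List Int)) (hE : E ≠ []) (w : Nat) :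
    (List.replicate w (E.headD []) ++ E).headD [] = E.headD [] := by
  cases w with
  | zero => simp
  | succ n => simp [List.replicate_succ]

lemma cons_rep_app (E : List (List Int)) (w : Nat) :
    (E.headD []) :: (List.replicate w (E.headD []) ++ E) = List.replicate (w + 1) (E.headD []) ++ E := by
  simp [List.replicate_succ]

-- main loop invariant: A's loop on the w-times-prepended path equals B's loop carrying the
-- running stationary-collision flag
lemma loop_eq (S E : List (List Int)) (hE : E ≠ []) (k w : Nat) :
    wcc_loop S (List.replicate w (E.headD []) ++ E) k w =
    wcc_bloop S (E.headD []) (pyMinIdx E 1) k w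
      ((List.range w).any (fun t => decide (E.headD [] = pyMinIdx S ((t : Int) + 1)))) := by
  induction k generalizing w with
  | zero => rfl
  | succ k ih =>
    have hany : (PySem.List.pyRange 0 ((w : Int) + 1) 1).any
        (fun t => cruce_colision [List.replicate w (E.headD []) ++ E, S] t)
        = (((List.range w).any (fun t => decide (E.headD [] = pyMinIdx S ((t : Int) + 1)))) ||
           (decide (pyMinIdx E 1 = pyMinIdx S ((w : Int) + 1)) ||
            (decide (E.headD [] = pyMinIdx S (w : Int) ∧ pyMinIdx E 1 = pyMinIdx S ((w : Int) + 1)) ||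
             decide (E.headD [] = pyMinIdx S ((w : Int) + 1) ∧ pyMinIdx E 1 = pyMinIdx S (w : Int))))) := by
      rw [PySem.List.pyRange_one, List.any_map]
      rw [show (((w : Int) + 1) - 0).toNat = w + 1 by omega]
      rw [List.range_succ, List.any_append]
      congr 1
      · apply PySem.List.any_congr_mem
        intro t ht
        have htw : t < w := List.mem_range.mp ht
        simp only [Function.comp_apply, zero_add]
        rw [cc_eval]
        rw [pyMinIdx_rep_app E hE w t (le_of_lt htw)]
        rw [show ((t : Int) + 1) = (((t + 1 : Nat) : Nat) : Int) by push_cast; ring]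
        rw [pyMinIdx_rep_app E hE w (t + 1) htw]
        push_cast
        exact decide_absorb _ _ _
      · simp only [List.any_cons, List.any_nil, Bool.or_false, Function.comp_apply, zero_add]
        rw [cc_eval]
        rw [pyMinIdx_rep_app E hE w w le_rfl, pyMinIdx_rep_app_succ E hE w]
        rw [Bool.decide_or]
        cases h1 : decide (pyMinIdx E 1 = pyMinIdx S ((w : Int) + 1)) <;>
          cases h2 : decide (E.headD [] = pyMinIdx S (w : Int) ∧ pyMinIdx E 1 = pyMinIdx S ((w : Int) + 1)) <;>
          cases h3 : decide (E.headD [] = pyMinIdx S ((w : Int) + 1) ∧ pyMinIdx E 1 = pyMinIdx S (w : Int)) <;>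
          simp
    rw [wcc_loop, wcc_bloop, hany]
    cases hc : (((List.range w).any (fun t => decide (E.headD [] = pyMinIdx S ((t : Int) + 1)))) ||
           (decide (pyMinIdx E 1 = pyMinIdx S ((w : Int) + 1)) ||
            (decide (E.headD [] = pyMinIdx S (w : Int) ∧ pyMinIdx E 1 = pyMinIdx S ((w : Int) + 1)) ||
             decide (E.headD [] = pyMinIdx S ((w : Int) + 1) ∧ pyMinIdx E 1 = pyMinIdx S (w : Int))))) with
    | false => simp
    | true =>
      simp only [if_true, Bool.not_true, Bool.false_eq_true, if_false]
      rw [head_rep_app E hE w, cons_rep_app E w, ih (w + 1)]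
      congr 1
      rw [List.range_succ, List.any_append]
      simp

-- ===== VERDICT (by name: the statement is the Claim_ definition above) =====
theorem wait_colision_calc_spec : Claim_equal_wait_colision_calc := by
  intro ps pm time mw _hdom hpre
  unfold Spec_wait_colision_calc wait_colision_calc wait_colision_calc_alt
  by_cases hmw : mw < 0
  · rw [if_pos hmw]
    rw [show (mw + 1).toNat = 0 by omega]
    rfl
  · rw [if_neg hmw]
    have hm : pm ≠ [] := by
      rcases hpre with h | ⟨_, hm⟩
      · omega
      · exact hm
    have hE : PySem.List.slice pm (some (min time ((pm.length : Int) - 1))) none ≠ [] :=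
      slice_min_ne_nil pm time hm
    have he0 : PySem.List.pyGetD (PySem.List.slice pm (some (min time ((pm.length : Int) - 1))) none) 0 []
        = (PySem.List.slice pm (some (min time ((pm.length : Int) - 1))) none).headD [] := by
      rw [PySem.List.pyGetD_zero]
      cases PySem.List.slice pm (some (min time ((pm.length : Int) - 1))) none <;> simp
    rw [he0]
    have h0 := loop_eq (PySem.List.slice ps (some (min time ((ps.length : Int) - 1))) none)
      (PySem.List.slice pm (some (min time ((pm.length : Int) - 1))) none) hE (mw + 1).toNat 0
    simp only [List.replicate_zero, List.nil_append, List.range_zero, List.any_nil] at h0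
    exact h0
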